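-- pv_equiv track=rewrite | github.com/d-mo/kibana-dashboard-api | kibana_dashboard_api/paneltools.py | find_shape
-- ===== SOURCE A (Python) =====
-- def find_shape(bottom_lines, max_len):
--     """
--     Finds a shape of lowest horizontal lines with step=1
--     :param bottom_lines:
--     :param max_len:
--     :return: list of levels (row values), list indexes are columns
--     """
--     shape = [1] * max_len
--     for i in range(max_len):
--         for line in bottom_lines:
--             if line[0] <= i + 1 < line[2]:
--                 shape[i] = line[1]
--                 break
--     return shape
-- ===== SOURCE B (Python) =====
-- def find_shape(bottom_lines, max_len):
--     # Fill whole intervals at once, iterating lines in reverse so that the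
--     # earliest matching line wins (A's first-match-with-break rule).
--     if max_len <= 0:
--         return []
--     shape = [1] * max_len
--     for line in reversed(bottom_lines):
--         lo = max(line[0] - 1, 0)
--         hi = min(line[2] - 1, max_len)
--         if lo < hi:
--             shape[lo:hi] = [line[1]] * (hi - lo)
--     return shape
-- ===== Notes on version B (the rewrite author's own statement) =====
-- stated objective: faster
-- what changed: Instead of scanning all lines for every column, B iterates the lines once in reverse and fills each line's whole column interval with one slice assignment, so earlier lines overwrite later ones and the first match wins.
-- outside the precondition, e.g. on find_shape([[1, 5, 3], [0]], 1): A returns [5], B raises IndexError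
import Mathlib
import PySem

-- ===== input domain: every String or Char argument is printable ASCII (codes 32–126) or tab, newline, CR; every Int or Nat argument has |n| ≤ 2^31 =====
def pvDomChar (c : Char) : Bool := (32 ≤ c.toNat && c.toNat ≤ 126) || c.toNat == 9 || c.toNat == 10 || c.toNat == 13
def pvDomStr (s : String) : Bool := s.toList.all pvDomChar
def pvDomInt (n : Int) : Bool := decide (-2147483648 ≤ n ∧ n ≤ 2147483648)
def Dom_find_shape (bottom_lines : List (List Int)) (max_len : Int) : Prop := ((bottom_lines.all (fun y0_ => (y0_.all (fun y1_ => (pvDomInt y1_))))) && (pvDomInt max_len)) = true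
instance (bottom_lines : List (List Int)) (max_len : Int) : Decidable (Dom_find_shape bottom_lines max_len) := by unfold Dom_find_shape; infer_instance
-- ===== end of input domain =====

-- B replaces A's per-column scan of all lines by a single reverse pass over the
-- lines that fills each line's whole column interval at once (earlier lines
-- overwrite later ones, reproducing A's first-match break).

-- ===== PORT A =====
-- inner 'for line in bottom_lines: … break': first matching line's line[1].
-- Under Pre_ every line has length ≥ 3, so all three lookups succeed; A's
-- left-to-right short-circuit of the chained comparison only matters outside Pre_.
def findLineA (i : Int) : List (List Int) → Option Int
  | [] => none
  | line :: rest =>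
    match PySem.List.pyGet? line 0, PySem.List.pyGet? line 2 with
    | some a, some c =>
      if a ≤ i + 1 ∧ i + 1 < c then PySem.List.pyGet? line 1
      else findLineA i rest
    | _, _ => findLineA i rest

def find_shape (bottom_lines : List (List Int)) (max_len : Int) : List Int :=
  (PySem.List.pyRange 0 max_len 1).foldl
    (fun shape i =>
      match findLineA i bottom_lines with
      | some v => shape.set i.toNat v
      | none => shape)
    (List.replicate max_len.toNat 1)

-- ===== PORT B =====
-- one line's slice assignment shape[lo:hi] = [line[1]] * (hi - lo)
def fillB (max_len : Int) (line : List Int) (shape : List Int) : List Int :=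
  match PySem.List.pyGet? line 0, PySem.List.pyGet? line 1, PySem.List.pyGet? line 2 with
  | some a, some b, some c =>
    let lo := max (a - 1) 0
    let hi := min (c - 1) max_len
    if lo < hi then
      shape.take lo.toNat ++ List.replicate (hi - lo).toNat b ++ shape.drop hi.toNat
    else shape
  | _, _, _ => shape

def find_shape_alt (bottom_lines : List (List Int)) (max_len : Int) : List Int :=
  if max_len ≤ 0 then []
  else bottom_lines.foldr (fillB max_len) (List.replicate max_len.toNat 1)

-- ===== PRECONDITION & SPEC =====
-- Pre_ excludes inputs where some line has fewer than 3 entries while columns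
-- exist: there A raises IndexError, except when the break (or the chained
-- comparison's short-circuit) skips the malformed line, in which case A still
-- returns but B's whole-interval pass raises IndexError (see claim.json cites).
def Pre_find_shape (bottom_lines : List (List Int)) (max_len : Int) : Prop :=
  max_len ≤ 0 ∨ ∀ l ∈ bottom_lines, 3 ≤ l.length
instance (bottom_lines : List (List Int)) (max_len : Int) : Decidable (Pre_find_shape bottom_lines max_len) := by unfold Pre_find_shape; infer_instance

def pvWitness_find_shape : List (List Int) × Int := ([[1, 3, 4], [2, 5, 3]], 4)

def Spec_find_shape (bottom_lines : List (List Int)) (max_len : Int) (out : List Int) : Prop := out = find_shape_alt bottom_lines max_len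
instance (bottom_lines : List (List Int)) (max_len : Int) (out : List Int) : Decidable (Spec_find_shape bottom_lines max_len out) := by unfold Spec_find_shape; infer_instance

-- ===== CLAIM (what is proved, stated in full; the proofs are below) =====
def Claim_equal_find_shape : Prop := ∀ (bottom_lines : List (List Int)) (max_len : Int), Dom_find_shape bottom_lines max_len → Pre_find_shape bottom_lines max_len → Spec_find_shape bottom_lines max_len (find_shape bottom_lines max_len)

-- ===== LEMMAS AND PROOFS =====

-- A's fold step
def stepA (bl : List (List Int)) (shape : List Int) (i : Int) : List Int :=
  match findLineA i bl with
  | some v => shape.set i.toNat v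
  | none => shape

lemma getElem?_foldl_stepA (bl : List (List Int)) :
    ∀ (L : List Int) (shape : List Int) (j : Nat), L.Nodup → (∀ i ∈ L, 0 ≤ i) →
      (L.foldl (stepA bl) shape)[j]? =
        if (j : Int) ∈ L then shape[j]?.map (fun old => (findLineA (j : Int) bl).getD old)
        else shape[j]? := by
  intro L
  induction L with
  | nil => intro shape j _ _; simp
  | cons i rest ih =>
    intro shape j hnd hpos
    have hnd' := hnd.of_cons
    have hnotmem : i ∉ rest := (List.nodup_cons.mp hnd).1
    have hpos' : ∀ x ∈ rest, 0 ≤ x := fun x hx => hpos x (List.mem_cons_of_mem _ hx)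
    have hi0 : 0 ≤ i := hpos i (List.mem_cons_self ..)
    simp only [List.foldl_cons]
    rw [ih (stepA bl shape i) j hnd' hpos']
    by_cases hji : (j : Int) = i
    · have hjm : (j : Int) ∉ rest := by rw [hji]; exact hnotmem
      have hmem : (j : Int) ∈ i :: rest := by rw [hji]; exact List.mem_cons_self ..
      simp only [hjm, if_pos hmem]
      unfold stepA
      have hij : i.toNat = j := by omega
      cases h : findLineA i bl with
      | none =>
        have : findLineA (j : Int) bl = none := by rw [hji]; exact h
        simp [this]
      | some v =>
        have : findLineA (j : Int) bl = some v := by rw [hji]; exact h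
        rw [hij]
        simp only [this, List.getElem?_set, Option.getD_some]
        by_cases hjl : j < shape.length
        · simp [hjl]
        · have hn : shape[j]? = none := List.getElem?_eq_none_iff.mpr (by omega)
          simp only [hn, Option.map_none]
          simp [hjl]
    · have hstep : (stepA bl shape i)[j]? = shape[j]? := by
        unfold stepA
        cases findLineA i bl with
        | none => rfl
        | some v =>
          have : i.toNat ≠ j := by omega
          simp [this]
      rw [hstep]
      by_cases hjm : (j : Int) ∈ rest
      · simp [hjm, List.mem_cons.mpr (Or.inr hjm)]
      · have : (j : Int) ∉ i :: rest := by
          simp [List.mem_cons, hji, hjm]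
        simp [hjm, this]

-- characterization of A's result
lemma getElem?_find_shape (bl : List (List Int)) (ml : Int) (j : Nat) :
    (find_shape bl ml)[j]? =
      if (j : Int) < ml then some ((findLineA (j : Int) bl).getD 1) else none := by
  unfold find_shape
  rw [show (fun shape i =>
      match findLineA i bl with
      | some v => shape.set i.toNat v
      | none => shape) = stepA bl from rfl]
  rw [getElem?_foldl_stepA bl _ _ j (PySem.List.nodup_pyRange_one 0 ml)
      (fun i hi => ((PySem.List.mem_pyRange_one).mp hi).1)]
  by_cases hj : (j : Int) < ml
  · have hmem : (j : Int) ∈ PySem.List.pyRange 0 ml 1 :=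
      (PySem.List.mem_pyRange_one).mpr ⟨by positivity, hj⟩
    have hjl : j < ml.toNat := by omega
    simp [hmem, hj, hjl]
  · have hmem : (j : Int) ∉ PySem.List.pyRange 0 ml 1 := by
      intro h; exact hj ((PySem.List.mem_pyRange_one).mp h).2
    have hjl : ¬ j < ml.toNat := by omega
    simp [hmem, hj, hjl]

-- getElem? of a slice assignment
lemma getElem?_sliceAssign (R : List Int) (lo hi b : Int) (h0 : 0 ≤ lo) (hlh : lo < hi)
    (hhi : hi ≤ (R.length : Int)) (j : Nat) :
    (R.take lo.toNat ++ List.replicate (hi - lo).toNat b ++ R.drop hi.toNat)[j]? =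
      if lo ≤ (j : Int) ∧ (j : Int) < hi then some b else R[j]? := by
  have hlt : lo.toNat ≤ R.length := by omega
  have hht : hi.toNat ≤ R.length := by omega
  by_cases h1 : j < lo.toNat
  · rw [List.getElem?_append_left, List.getElem?_append_left]
    · simp only [List.getElem?_take]
      have : ¬ (lo ≤ (j : Int) ∧ (j : Int) < hi) := by omega
      simp [h1, this]
    · simpa [List.length_take] using by omega
    · simp [List.length_take]; omega
  · by_cases h2 : j < lo.toNat + (hi - lo).toNat
    · rw [List.getElem?_append_left, List.getElem?_append_right]
      · have hcond : lo ≤ (j : Int) ∧ (j : Int) < hi := by omega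
        simp only [List.length_take, List.getElem?_replicate]
        have : j - min lo.toNat R.length < (hi - lo).toNat := by omega
        simp [this, hcond]
      · simp [List.length_take]; omega
      · simp [List.length_take]; omega
    · rw [List.getElem?_append_right]
      · simp only [List.length_append, List.length_take, List.length_replicate,
          List.getElem?_drop]
        have hcond : ¬ (lo ≤ (j : Int) ∧ (j : Int) < hi) := by omega
        have harg : hi.toNat + (j - (min lo.toNat R.length + (hi - lo).toNat)) = j := by omega
        rw [harg]
        simp [hcond]
      · simp [List.length_take]; omega

-- characterization of B's fold
-- pyGet? on a list with at least three entries
lemma pyGet0 (a b c : Int) (t : List Int) : PySem.List.pyGet? (a::b::c::t) 0 = some a := by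
  simp only [PySem.List.pyGet?, PySem.List.pyIdx?]
  rw [if_pos (by omega), if_pos (by push_cast [List.length_cons]; omega)]
  simp

lemma pyGet1 (a b c : Int) (t : List Int) : PySem.List.pyGet? (a::b::c::t) 1 = some b := by
  simp only [PySem.List.pyGet?, PySem.List.pyIdx?]
  rw [if_pos (by omega), if_pos (by push_cast [List.length_cons]; omega)]
  simp

lemma pyGet2 (a b c : Int) (t : List Int) : PySem.List.pyGet? (a::b::c::t) 2 = some c := by
  simp only [PySem.List.pyGet?, PySem.List.pyIdx?]
  rw [if_pos (by omega), if_pos (by push_cast [List.length_cons]; omega)]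
  simp

lemma fillB_cons (ml a b c : Int) (t shape : List Int) :
    fillB ml (a::b::c::t) shape =
      if max (a-1) 0 < min (c-1) ml then
        shape.take (max (a-1) 0).toNat ++
          List.replicate (min (c-1) ml - max (a-1) 0).toNat b ++
          shape.drop (min (c-1) ml).toNat
      else shape := by
  unfold fillB
  rw [pyGet0, pyGet1, pyGet2]

lemma length_fillB (ml a b c : Int) (t shape : List Int) (h : shape.length = ml.toNat) :
    (fillB ml (a::b::c::t) shape).length = ml.toNat := by
  rw [fillB_cons]
  by_cases hlh : max (a-1) 0 < min (c-1) ml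
  · simp only [if_pos hlh, List.length_append, List.length_take, List.length_replicate,
      List.length_drop, h]
    omega
  · rw [if_neg hlh]; exact h

lemma length_foldr_fillB (ml : Int) :
    ∀ (bl : List (List Int)), (∀ l ∈ bl, 3 ≤ l.length) →
      (bl.foldr (fillB ml) (List.replicate ml.toNat 1)).length = ml.toNat := by
  intro bl
  induction bl with
  | nil => intro _; simp
  | cons l rest ih =>
    intro h3
    have hl := h3 l (List.mem_cons_self ..)
    rcases l with _ | ⟨a, l⟩; · simp at hl
    rcases l with _ | ⟨b, l⟩; · simp at hl
    rcases l with _ | ⟨c, t⟩; · simp at hl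
    simp only [List.foldr_cons]
    exact length_fillB ml a b c t _ (ih (fun l hl => h3 l (List.mem_cons_of_mem _ hl)))

lemma getElem?_foldr_fillB (ml : Int) (hml : 0 < ml) :
    ∀ (bl : List (List Int)), (∀ l ∈ bl, 3 ≤ l.length) → ∀ (j : Nat),
      (bl.foldr (fillB ml) (List.replicate ml.toNat 1))[j]? =
        if (j : Int) < ml then some ((findLineA (j : Int) bl).getD 1) else none := by
  intro bl
  induction bl with
  | nil =>
    intro _ j
    by_cases hj : (j : Int) < ml
    · have hjn : j < ml.toNat := by omega
      simp [findLineA, hjn, hj]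
    · have hjn : ¬ j < ml.toNat := by omega
      simp [hjn, hj]
  | cons l rest ih =>
    intro h3 j
    have hl := h3 l (List.mem_cons_self ..)
    rcases l with _ | ⟨a, l⟩; · simp at hl
    rcases l with _ | ⟨b, l⟩; · simp at hl
    rcases l with _ | ⟨c, t⟩; · simp at hl
    have h3' : ∀ l ∈ rest, 3 ≤ l.length := fun l hl => h3 l (List.mem_cons_of_mem _ hl)
    have hR := ih h3'
    have hRlen : (rest.foldr (fillB ml) (List.replicate ml.toNat 1)).length = ml.toNat :=
      length_foldr_fillB ml rest h3'
    rw [List.foldr_cons, fillB_cons]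
    by_cases hlh : max (a-1) 0 < min (c-1) ml
    · rw [if_pos hlh,
        getElem?_sliceAssign _ (max (a-1) 0) (min (c-1) ml) b (le_max_right _ _) hlh
          (by rw [hRlen]; omega) j]
      by_cases hj : (j : Int) < ml
      · by_cases hcov : a ≤ (j:Int) + 1 ∧ (j:Int) + 1 < c
        · have hin : max (a-1) 0 ≤ (j:Int) ∧ (j:Int) < min (c-1) ml := by omega
          rw [if_pos hin, if_pos hj]
          simp [findLineA, pyGet0, pyGet1, pyGet2, hcov]
        · have hout : ¬ (max (a-1) 0 ≤ (j:Int) ∧ (j:Int) < min (c-1) ml) := by omega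
          rw [if_neg hout, hR j]
          simp [findLineA, pyGet0, pyGet2, hcov]
      · have hout : ¬ (max (a-1) 0 ≤ (j:Int) ∧ (j:Int) < min (c-1) ml) := by omega
        rw [if_neg hout, hR j, if_neg hj, if_neg hj]
    · rw [if_neg hlh, hR j]
      by_cases hj : (j : Int) < ml
      · have hcov : ¬ (a ≤ (j:Int) + 1 ∧ (j:Int) + 1 < c) := by omega
        simp [findLineA, pyGet0, pyGet2, hcov]
      · simp [hj]

-- ===== VERDICT (by name: the statement is the Claim_ definition above) =====
theorem find_shape_spec : Claim_equal_find_shape := by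
  intro bl ml _ hpre
  unfold Spec_find_shape find_shape_alt
  by_cases hml : ml ≤ 0
  · simp only [if_pos hml]
    unfold find_shape
    rw [PySem.List.pyRange_one_eq_nil hml]
    simp [show ml.toNat = 0 by omega]
  · have hml' : 0 < ml := by omega
    have hlines : ∀ l ∈ bl, 3 ≤ l.length := by
      rcases hpre with h | h
      · omega
      · exact h
    simp only [if_neg hml]
    apply List.ext_getElem?
    intro j
    rw [getElem?_find_shape, getElem?_foldr_fillB ml hml' bl hlines j]
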